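-- pv_equiv track=rewrite | github.com/gustcol/Canivete | cloud-custodian/tools/c7n_mailer/c7n_mailer/utils.py | get_resource_tag_targets
-- ===== SOURCE A (Python) =====
-- def get_resource_tag_targets(resource, target_tag_keys):
--     if 'Tags' not in resource:
--         return []
--     if isinstance(resource['Tags'], dict):
--         tags = resource['Tags']
--     else:
--         tags = {tag['Key']: tag['Value'] for tag in resource['Tags']}
--     targets = []
--     for target_tag_key in target_tag_keys:
--         if target_tag_key in tags:
--             targets.append(tags[target_tag_key])
--     return targets
-- ===== SOURCE B (Python) =====
-- def get_resource_tag_targets(resource, target_tag_keys):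
--     if 'Tags' not in resource:
--         return []
--     tags = resource['Tags']
--     if isinstance(tags, dict):
--         return [tags[k] for k in target_tag_keys if k in tags]
--     targets = []
--     for key in target_tag_keys:
--         for tag in reversed(tags):
--             if tag['Key'] == key:
--                 targets.append(tag['Value'])
--                 break
--     return targets
-- ===== Notes on version B (the rewrite author's own statement) =====
-- stated objective: alternative
-- what changed: Instead of building an intermediate Key->Value dict and then looking target keys up in it, B scans the tag list in reverse for each target key and appends the first (i.e. last-occurrence) match, reproducing the dict-comprehension's last-value-wins semantics without constructing a dict.
-- outside the precondition, e.g. on get_resource_tag_targets({'Tags': [{'Value': 'v'}]}, []): A raises KeyError, B returns []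
import Mathlib
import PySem

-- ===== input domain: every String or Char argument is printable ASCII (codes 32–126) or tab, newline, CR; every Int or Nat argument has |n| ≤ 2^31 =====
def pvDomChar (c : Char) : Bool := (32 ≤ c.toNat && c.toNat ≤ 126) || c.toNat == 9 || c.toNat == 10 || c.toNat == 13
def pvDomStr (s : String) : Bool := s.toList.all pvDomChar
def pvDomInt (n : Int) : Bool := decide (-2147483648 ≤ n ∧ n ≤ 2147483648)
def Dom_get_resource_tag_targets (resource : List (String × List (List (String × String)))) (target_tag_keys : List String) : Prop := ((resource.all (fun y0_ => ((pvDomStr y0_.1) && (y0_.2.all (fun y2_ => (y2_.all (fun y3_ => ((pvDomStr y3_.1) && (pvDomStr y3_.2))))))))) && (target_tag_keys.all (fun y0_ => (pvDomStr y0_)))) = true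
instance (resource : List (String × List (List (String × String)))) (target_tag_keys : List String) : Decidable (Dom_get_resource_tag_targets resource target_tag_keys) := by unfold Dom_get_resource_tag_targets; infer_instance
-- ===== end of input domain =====

-- B replaces A's intermediate Key->Value dict by a per-target-key reverse scan of the tag list
-- (last-occurrence match), a different decomposition of the same task (objective: alternative).


-- shared assoc-list lookup (Python dict lookup: first match under the type convention)
def pvLookup? {α : Type} (d : List (String × α)) (k : String) : Option α :=
  (d.find? (fun p => p.1 == k)).map (·.2)

-- ===== PORT A =====
-- A builds a dict Key->Value from the tag list (last value wins), then looks each target key up.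
-- tag['Key'] / tag['Value'] use getD "" only outside Pre_ (Python raises KeyError there).
def get_resource_tag_targets (resource : List (String × List (List (String × String)))) (target_tag_keys : List String) : List String :=
  match pvLookup? resource "Tags" with
  | none => []
  | some tagList =>
    let tags : PySem.Dict String String :=
      tagList.foldl (fun d tag =>
        d.insert ((pvLookup? tag "Key").getD "") ((pvLookup? tag "Value").getD "")) PySem.Dict.empty
    target_tag_keys.foldl (fun targets k =>
      match tags.get? k with
      | some v => targets ++ [v]
      | none => targets) []

-- ===== PORT B =====
-- for one target key: first tag of the reversed list whose 'Key' matches (Python's reversed+break)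
def pvLastTagValue? (tagList : List (List (String × String))) (k : String) : Option String :=
  (tagList.reverse.find? (fun tag => (pvLookup? tag "Key").getD "" == k)).map
    (fun tag => (pvLookup? tag "Value").getD "")

def get_resource_tag_targets_alt (resource : List (String × List (List (String × String)))) (target_tag_keys : List String) : List String :=
  match pvLookup? resource "Tags" with
  | none => []
  | some tagList =>
    target_tag_keys.foldl (fun targets k =>
      match pvLastTagValue? tagList k with
      | some v => targets ++ [v]
      | none => targets) []

-- ===== PRECONDITION & SPEC =====
-- Pre_ excludes exactly the inputs where Python A raises KeyError: a tag dict in resource['Tags']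
-- lacking the 'Key' or 'Value' entry.
def Pre_get_resource_tag_targets (resource : List (String × List (List (String × String)))) (target_tag_keys : List String) : Prop :=
  ((pvLookup? resource "Tags").getD []).all
    (fun tag => (pvLookup? tag "Key").isSome && (pvLookup? tag "Value").isSome) = true

instance (resource : List (String × List (List (String × String)))) (target_tag_keys : List String) : Decidable (Pre_get_resource_tag_targets resource target_tag_keys) := by unfold Pre_get_resource_tag_targets; infer_instance

def pvWitness_get_resource_tag_targets : (List (String × List (List (String × String)))) × List String :=
  ([("Tags", [[("Key", "env"), ("Value", "prod")]])], ["env"])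

def Spec_get_resource_tag_targets (resource : List (String × List (List (String × String)))) (target_tag_keys : List String) (out : List String) : Prop := out = get_resource_tag_targets_alt resource target_tag_keys
instance (resource : List (String × List (List (String × String)))) (target_tag_keys : List String) (out : List String) : Decidable (Spec_get_resource_tag_targets resource target_tag_keys out) := by unfold Spec_get_resource_tag_targets; infer_instance

-- ===== CLAIM (what is proved, stated in full; the proofs are below) =====
def Claim_equal_get_resource_tag_targets : Prop := ∀ (resource : List (String × List (List (String × String)))) (target_tag_keys : List String), Dom_get_resource_tag_targets resource target_tag_keys → Pre_get_resource_tag_targets resource target_tag_keys → Spec_get_resource_tag_targets resource target_tag_keys (get_resource_tag_targets resource target_tag_keys)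

-- ===== LEMMAS AND PROOFS =====

-- dict built by last-wins inserts looks up to the last matching tag of the list
theorem pv_foldl_insert_get? (L : List (List (String × String))) (d : PySem.Dict String String) (k : String) :
    (L.foldl (fun d tag =>
        d.insert ((pvLookup? tag "Key").getD "") ((pvLookup? tag "Value").getD "")) d).get? k
    = match L.reverse.find? (fun tag => (pvLookup? tag "Key").getD "" == k) with
      | some tag => some ((pvLookup? tag "Value").getD "")
      | none => d.get? k := by
  induction L generalizing d with
  | nil => simp
  | cons t L ih =>
    simp only [List.foldl_cons, List.reverse_cons, List.find?_append, ih]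
    cases hf : L.reverse.find? (fun tag => (pvLookup? tag "Key").getD "" == k) with
    | some tag => simp
    | none =>
      simp only [List.find?]
      by_cases hk : ((pvLookup? t "Key").getD "" == k) = true
      · have : k = (pvLookup? t "Key").getD "" := (beq_iff_eq.mp hk).symm
        simp [this, PySem.Dict.get?_insert_self]
      · have hne : k ≠ (pvLookup? t "Key").getD "" := by
          intro h; exact hk (beq_iff_eq.mpr h.symm)
        simp [hk, PySem.Dict.get?_insert_of_ne _ _ hne]

theorem pv_step_eq (tagList : List (List (String × String))) (k : String) :
    (match (tagList.foldl (fun d tag =>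
        d.insert ((pvLookup? tag "Key").getD "") ((pvLookup? tag "Value").getD "")) PySem.Dict.empty).get? k with
      | some v => some v
      | none => none)
    = pvLastTagValue? tagList k := by
  rw [pv_foldl_insert_get?]
  unfold pvLastTagValue?
  cases hf : tagList.reverse.find? (fun tag => (pvLookup? tag "Key").getD "" == k) <;> simp

-- ===== VERDICT (by name: the statement is the Claim_ definition above) =====
theorem get_resource_tag_targets_spec : Claim_equal_get_resource_tag_targets := by
  intro resource target_tag_keys _ _
  unfold Spec_get_resource_tag_targets get_resource_tag_targets get_resource_tag_targets_alt
  cases h : pvLookup? resource "Tags" with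
  | none => rfl
  | some tagList =>
    simp only []
    congr 1
    funext targets k
    have := pv_step_eq tagList k
    cases hg : (tagList.foldl (fun d tag =>
        d.insert ((pvLookup? tag "Key").getD "") ((pvLookup? tag "Value").getD "")) PySem.Dict.empty).get? k with
    | some v =>
      rw [hg] at this
      simp only [← this]
    | none =>
      rw [hg] at this
      simp only [← this]
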